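-- pv_equiv track=rewrite | github.com/michaelbrewerdavis/advent2024 | day2.py | is_safe_with_problem_dampener
-- ===== SOURCE A (Python) =====
-- def is_safe(line):
--     last = None
--     dir = None
--
--     for num in line:
--         if last is None:
--             pass
--         else:
--             if last == num:
--                 return False
--             elif abs(last - num) > 3:
--                 return False
--
--             if dir is None:
--                 if last > num:
--                     dir = "decreasing"
--                 else:
--                     dir = "increasing"
--             else:
--                 if last > num and dir == "increasing":
--                     return False
--                 if last < num and dir == "decreasing":
--                     return False
--
--         last = num
--     return True
--
-- def is_safe_with_problem_dampener(line: list[int]) -> bool: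
--     if is_safe(line):
--         return True
--     else:
--         for i in range(len(line)):
--             copy = line[::]
--             del copy[i]
--             if is_safe(copy):
--                 return True
--     return False
-- ===== SOURCE B (Python) =====
-- # B: O(n) single pass per direction: find the first step outside the allowed band and
-- # only try removing one of its two endpoints (any other removal leaves the bad pair adjacent).
-- def is_safe_with_problem_dampener(line: list[int]) -> bool:
--     def mono(xs, lo, hi):
--         return all(lo <= xs[k + 1] - xs[k] <= hi for k in range(len(xs) - 1))
--
--     def fixable(lo, hi):
--         j = None
--         for k in range(len(line) - 1):
--             if not (lo <= line[k + 1] - line[k] <= hi):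
--                 j = k
--                 break
--         if j is None:
--             return True
--         return mono(line[:j] + line[j + 1:], lo, hi) or mono(line[:j + 1] + line[j + 2:], lo, hi)
--
--     return fixable(1, 3) or fixable(-3, -1)
-- ===== Notes on version B (the rewrite author's own statement) =====
-- stated objective: faster
-- what changed: Instead of re-running the safety scan on all n one-element-deleted copies, B characterises safety as 'all adjacent steps in [1,3] or all in [-3,-1]' and, per direction, locates the first out-of-band step and tests only the two deletions at its endpoints (any other deletion leaves that bad pair adjacent).
import Mathlib
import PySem

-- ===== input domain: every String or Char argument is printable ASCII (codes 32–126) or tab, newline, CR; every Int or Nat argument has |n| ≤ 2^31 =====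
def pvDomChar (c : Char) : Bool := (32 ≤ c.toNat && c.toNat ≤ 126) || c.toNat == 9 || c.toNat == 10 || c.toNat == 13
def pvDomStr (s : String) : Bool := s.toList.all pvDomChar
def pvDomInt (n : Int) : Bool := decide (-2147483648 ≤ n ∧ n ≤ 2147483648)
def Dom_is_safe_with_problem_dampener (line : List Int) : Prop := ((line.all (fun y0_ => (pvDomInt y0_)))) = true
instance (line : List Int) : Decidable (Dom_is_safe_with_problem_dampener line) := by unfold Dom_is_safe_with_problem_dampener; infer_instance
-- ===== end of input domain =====

-- B replaces A's "try deleting every index" scan by checking only the two endpoints of the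
-- first out-of-band step, once per direction (objective: faster).

-- ===== PORT A =====
-- the loop body of is_safe after the first element: state (last, dir), early returns
def pvIsSafeGo (last : Int) (dir : Option String) (xs : List Int) : Bool :=
  match xs with
  | [] => true
  | num :: rest =>
    if last == num then false
    else if (last - num).natAbs > 3 then false   -- abs(last - num) > 3
    else
      match dir with
      | none => pvIsSafeGo num (some (if last > num then "decreasing" else "increasing")) rest
      | some d =>
        if last > num && d == "increasing" then false
        else if last < num && d == "decreasing" then false
        else pvIsSafeGo num (some d) rest

def pvIsSafe (line : List Int) : Bool :=
  match line with
  | [] => true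
  | a :: rest => pvIsSafeGo a none rest   -- first iteration only sets last := a

def is_safe_with_problem_dampener (line : List Int) : Bool :=
  if pvIsSafe line then true
  else (List.range line.length).any (fun i => pvIsSafe (line.eraseIdx i))
  -- copy = line[::]; del copy[i]  ≡  line.eraseIdx i (i < len(line) here)

-- ===== PORT B =====
def pvOk (lo hi a b : Int) : Bool := lo ≤ b - a && b - a ≤ hi

def pvMono (lo hi : Int) : List Int → Bool
  | a :: b :: t => pvOk lo hi a b && pvMono lo hi (b :: t)
  | _ => true

-- the "first k with a bad step" search loop of fixable
def pvFirstBad (lo hi : Int) : List Int → Option Nat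
  | a :: b :: t => if pvOk lo hi a b then (pvFirstBad lo hi (b :: t)).map (· + 1) else some 0
  | _ => none

def pvFixable (lo hi : Int) (line : List Int) : Bool :=
  match pvFirstBad lo hi line with
  | none => true
  | some j =>
      pvMono lo hi (line.take j ++ line.drop (j + 1)) ||      -- line[:j] + line[j+1:]
      pvMono lo hi (line.take (j + 1) ++ line.drop (j + 2))   -- line[:j+1] + line[j+2:]

def is_safe_with_problem_dampener_alt (line : List Int) : Bool :=
  pvFixable 1 3 line || pvFixable (-3) (-1) line

-- ===== PRECONDITION & SPEC =====
def Spec_is_safe_with_problem_dampener (line : List Int) (out : Bool) : Prop := out = is_safe_with_problem_dampener_alt line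
instance (line : List Int) (out : Bool) : Decidable (Spec_is_safe_with_problem_dampener line out) := by unfold Spec_is_safe_with_problem_dampener; infer_instance

-- ===== CLAIM (what is proved, stated in full; the proofs are below) =====
def Claim_equal_is_safe_with_problem_dampener : Prop := ∀ (line : List Int), Dom_is_safe_with_problem_dampener line → Spec_is_safe_with_problem_dampener line (is_safe_with_problem_dampener line)

-- ===== LEMMAS AND PROOFS =====

-- A's stateful safety check equals "all steps in [1,3]" or "all steps in [-3,-1]"
theorem pvIsSafeGo_eq (xs : List Int) : ∀ a : Int,
    pvIsSafeGo a none xs = (pvMono 1 3 (a :: xs) || pvMono (-3) (-1) (a :: xs)) ∧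
    pvIsSafeGo a (some "increasing") xs = pvMono 1 3 (a :: xs) ∧
    pvIsSafeGo a (some "decreasing") xs = pvMono (-3) (-1) (a :: xs) := by
  induction xs with
  | nil => intro a; simp [pvIsSafeGo, pvMono]
  | cons b t ih =>
    intro a
    obtain ⟨h1, h2, h3⟩ := ih b
    by_cases hab : a = b
    · subst hab
      simp [pvIsSafeGo, pvMono, pvOk]
    · by_cases habs : (a - b).natAbs > 3
      · have o1 : pvOk 1 3 a b = false := by simp [pvOk]; omega
        have o2 : pvOk (-3) (-1) a b = false := by simp [pvOk]; omega
        simp [pvIsSafeGo, pvMono, hab, habs, o1, o2]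
      · by_cases hlt : a > b
        · have o1 : pvOk 1 3 a b = false := by simp [pvOk]; omega
          have o2 : pvOk (-3) (-1) a b = true := by simp [pvOk]; omega
          simp [pvIsSafeGo, pvMono, hab, habs, hlt, o1, o2, h3]
          all_goals (intros; omega)
        · have hlt' : a < b := by omega
          have o1 : pvOk 1 3 a b = true := by simp [pvOk]; omega
          have o2 : pvOk (-3) (-1) a b = false := by simp [pvOk]; omega
          simp [pvIsSafeGo, pvMono, hab, habs, hlt, hlt', o1, o2, h2]

theorem pvIsSafe_eq (l : List Int) :
    pvIsSafe l = (pvMono 1 3 l || pvMono (-3) (-1) l) := by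
  cases l with
  | nil => simp [pvIsSafe, pvMono]
  | cons a t => exact (pvIsSafeGo_eq t a).1

-- pointwise characterisation of pvMono
theorem pvMono_iff (lo hi : Int) (l : List Int) :
    pvMono lo hi l = true ↔ ∀ k (h : k + 1 < l.length), pvOk lo hi l[k] l[k+1] = true := by
  induction l with
  | nil => simp [pvMono]
  | cons a t ih =>
    cases t with
    | nil => simp [pvMono]
    | cons b t' =>
      simp only [pvMono, Bool.and_eq_true, ih]
      constructor
      · rintro ⟨h0, h⟩ k hk
        cases k with
        | zero => simpa using h0
        | succ k => simpa using h k (by simpa using hk)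
      · intro h
        refine ⟨by simpa using h 0 (by simp), fun k hk => ?_⟩
        simpa using h (k+1) (by simpa using hk)

theorem pvFirstBad_none (lo hi : Int) (l : List Int) :
    pvFirstBad lo hi l = none ↔ pvMono lo hi l = true := by
  induction l with
  | nil => simp [pvFirstBad, pvMono]
  | cons a t ih =>
    cases t with
    | nil => simp [pvFirstBad, pvMono]
    | cons b t' =>
      simp only [pvFirstBad, pvMono]
      by_cases h : pvOk lo hi a b = true
      · simp [h, ih]
      · rw [Bool.not_eq_true] at h
        simp [h]

theorem pvFirstBad_some (lo hi : Int) (l : List Int) : ∀ j, pvFirstBad lo hi l = some j →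
    j + 1 < l.length ∧ pvOk lo hi (l.getD j 0) (l.getD (j+1) 0) = false := by
  induction l with
  | nil => simp [pvFirstBad]
  | cons a t ih =>
    cases t with
    | nil => simp [pvFirstBad]
    | cons b t' =>
      intro j
      simp only [pvFirstBad]
      by_cases h : pvOk lo hi a b = true
      · rw [if_pos h]
        intro hj
        rw [Option.map_eq_some_iff] at hj
        obtain ⟨k, hk, hk'⟩ := hj
        obtain ⟨hk1, hk2⟩ := ih k hk
        subst hk'
        refine ⟨by simpa using hk1, by simpa using hk2⟩
      · rw [Bool.not_eq_true] at h
        intro hj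
        simp [h] at hj
        subst hj
        simpa using h

-- a bad pair at (j, j+1) survives deleting any index other than j or j+1
theorem pvBad_survives (lo hi : Int) (l : List Int) (j i : Nat)
    (hj : j + 1 < l.length)
    (hbad : pvOk lo hi (l.getD j 0) (l.getD (j+1) 0) = false)
    (hij : i ≠ j) (hij1 : i ≠ j + 1) :
    pvMono lo hi (l.eraseIdx i) = false := by
  have hjl : j < l.length := by omega
  rw [List.getD_eq_getElem l 0 hjl, List.getD_eq_getElem l 0 hj] at hbad
  by_contra h
  rw [Bool.not_eq_false, pvMono_iff] at h
  by_cases hil : l.length ≤ i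
  · rw [List.eraseIdx_of_length_le hil] at h
    have := h j hj
    rw [hbad] at this; exact absurd this (by simp)
  · rw [Nat.not_le] at hil
    have hlen : (l.eraseIdx i).length = l.length - 1 := by
      rw [List.length_eraseIdx]; simp [hil]
    rcases Nat.lt_or_ge i j with hij' | hij'
    · -- i < j : bad pair sits at positions (j-1, j) of the erased list
      have hj1 : j - 1 + 1 < (l.eraseIdx i).length := by omega
      have := h (j - 1) hj1
      rw [List.getElem_eraseIdx, List.getElem_eraseIdx] at this
      rw [dif_neg (by omega), dif_neg (by omega)] at this
      have e1 : j - 1 + 1 = j := by omega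
      simp only [e1] at this
      rw [hbad] at this; exact absurd this (by simp)
    · have hij'' : j + 1 < i := by omega
      -- j+1 < i : bad pair sits at positions (j, j+1) of the erased list
      have hjlt : j + 1 < (l.eraseIdx i).length := by omega
      have := h j hjlt
      rw [List.getElem_eraseIdx, List.getElem_eraseIdx] at this
      rw [dif_pos (by omega), dif_pos (by omega)] at this
      rw [hbad] at this; exact absurd this (by simp)

theorem pvFixable_iff (lo hi : Int) (l : List Int) :
    pvFixable lo hi l = true ↔
      (pvMono lo hi l = true ∨ ∃ i < l.length, pvMono lo hi (l.eraseIdx i) = true) := by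
  cases hfb : pvFirstBad lo hi l with
  | none => simp [pvFixable, hfb, (pvFirstBad_none lo hi l).1 hfb]
  | some j =>
    obtain ⟨hjlen, hbad⟩ := pvFirstBad_some lo hi l j hfb
    have hmono : pvMono lo hi l = false := by
      cases hml : pvMono lo hi l
      · rfl
      · exact absurd ((pvFirstBad_none lo hi l).2 hml) (by simp [hfb])
    simp only [pvFixable, hfb]
    rw [← List.eraseIdx_eq_take_drop_succ, ← List.eraseIdx_eq_take_drop_succ]
    simp only [hmono, Bool.or_eq_true]
    constructor
    · rintro (h | h)
      · exact Or.inr ⟨j, by omega, h⟩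
      · exact Or.inr ⟨j + 1, by omega, h⟩
    · rintro (h | ⟨i, hilen, hmi⟩)
      · simp at h
      · by_cases hij : i = j
        · exact Or.inl (hij ▸ hmi)
        · by_cases hij1 : i = j + 1
          · exact Or.inr (hij1 ▸ hmi)
          · rw [pvBad_survives lo hi l j i hjlen hbad hij hij1] at hmi
            exact absurd hmi (by simp)

theorem pvA_iff (l : List Int) :
    is_safe_with_problem_dampener l = true ↔
      (pvIsSafe l = true ∨ ∃ i < l.length, pvIsSafe (l.eraseIdx i) = true) := by
  unfold is_safe_with_problem_dampener
  by_cases h : pvIsSafe l = true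
  · simp [h]
  · simp [h]

-- ===== VERDICT (by name: the statement is the Claim_ definition above) =====
theorem is_safe_with_problem_dampener_spec : Claim_equal_is_safe_with_problem_dampener := by
  intro line _
  unfold Spec_is_safe_with_problem_dampener
  have key : is_safe_with_problem_dampener line = true ↔
      is_safe_with_problem_dampener_alt line = true := by
    rw [pvA_iff]
    unfold is_safe_with_problem_dampener_alt
    simp only [Bool.or_eq_true, pvFixable_iff, pvIsSafe_eq, Bool.or_eq_true]
    constructor
    · rintro (⟨h | h⟩ | ⟨i, hi, h | h⟩)
      · exact Or.inl (Or.inl h)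
      · exact Or.inr (Or.inl h)
      · exact Or.inl (Or.inr ⟨i, hi, h⟩)
      · exact Or.inr (Or.inr ⟨i, hi, h⟩)
    · rintro (⟨h | ⟨i, hi, h⟩⟩ | ⟨h | ⟨i, hi, h⟩⟩)
      · exact Or.inl (Or.inl h)
      · exact Or.inr ⟨i, hi, Or.inl h⟩
      · exact Or.inl (Or.inr h)
      · exact Or.inr ⟨i, hi, Or.inr h⟩
  cases hA : is_safe_with_problem_dampener line
  · cases hB : is_safe_with_problem_dampener_alt line
    · rfl
    · exact absurd (key.2 hB) (by simp [hA])
  · exact (key.1 hA).symm
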